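-- pv_equiv track=rewrite | github.com/portability-py-project/msr-submission | rqs/rq1/mining_issues_script.py | format_concept_hits
-- ===== SOURCE A (Python) =====
-- from typing import List, Dict, Iterable, Optional, Tuple
--
-- def format_concept_hits(hits: Dict[str, List[str]]) -> str:
--     """Format concept hits for CSV output (e.g., 'OS=windows|linux; FIX=bug|fix')."""
--     order = ["OS", "FIX", "TEST_CI", "CAUSE", "API"]
--     parts: List[str] = []
--     for key in order:
--         if key in hits and hits[key]:
--             parts.append(f"{key}=" + "|".join(hits[key]))
--     # Include any additional categories
--     for key in sorted(hits.keys()):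
--         if key not in order and hits[key]:
--             parts.append(f"{key}=" + "|".join(hits[key]))
--     return "; ".join(parts)
-- ===== SOURCE B (Python) =====
-- from typing import List, Dict
--
-- def format_concept_hits(hits: Dict[str, List[str]]) -> str:
--     """Format concept hits for CSV output (e.g., 'OS=windows|linux; FIX=bug|fix')."""
--     order = ["OS", "FIX", "TEST_CI", "CAUSE", "API"]
--
--     def rank(k: str) -> int:
--         return order.index(k) if k in order else len(order)
--
--     parts: List[str] = []
--     for key in sorted(hits, key=lambda k: (rank(k), k)):
--         if hits[key]:
--             parts.append(f"{key}=" + "|".join(hits[key]))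
--     return "; ".join(parts)
-- ===== Notes on version B (the rewrite author's own statement) =====
-- stated objective: alternative
-- what changed: Replaces A's two emission passes (fixed-order loop over the known categories, then an alphabetical loop over the extras) by one sort-driven traversal of all keys under the priority key (rank(k), k).
import Mathlib
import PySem

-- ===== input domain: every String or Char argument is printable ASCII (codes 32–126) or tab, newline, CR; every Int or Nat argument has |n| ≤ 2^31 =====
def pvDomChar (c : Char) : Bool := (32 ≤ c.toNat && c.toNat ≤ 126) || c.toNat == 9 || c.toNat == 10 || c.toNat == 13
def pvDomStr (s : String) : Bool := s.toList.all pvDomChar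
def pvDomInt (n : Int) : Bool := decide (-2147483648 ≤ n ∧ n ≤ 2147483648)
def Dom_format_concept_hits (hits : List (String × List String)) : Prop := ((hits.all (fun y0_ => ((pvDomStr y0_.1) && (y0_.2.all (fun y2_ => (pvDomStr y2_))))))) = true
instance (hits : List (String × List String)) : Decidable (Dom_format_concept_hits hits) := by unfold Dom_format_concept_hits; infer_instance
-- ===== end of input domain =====

-- B fuses A's two emission passes into one sort-driven traversal under the priority key (rank(k), k); alternative decomposition, same cost.


-- ===== PORT A =====
-- the fixed category order (a literal in both Pythons)
def pvOrder : List String := ["OS", "FIX", "TEST_CI", "CAUSE", "API"]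

-- f"{key}=" + "|".join(hits[key])
def pvFmt (d : PySem.Dict String (List String)) (k : String) : String :=
  k ++ "=" ++ PySem.Str.join "|" (PySem.Dict.getD d k [])

def format_concept_hits (hits : List (String × List String)) : String :=
  let d := PySem.Dict.ofList hits
  -- for key in order: if key in hits and hits[key]: parts.append(...)
  let parts1 := pvOrder.foldl (fun ps k =>
      if (d.contains k && !(PySem.Dict.getD d k []).isEmpty) = true then ps ++ [pvFmt d k] else ps) []
  -- for key in sorted(hits.keys()): if key not in order and hits[key]: parts.append(...)
  let parts := (PySem.List.sorted d.keys (fun k => k) false).foldl (fun ps k =>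
      if (!pvOrder.contains k && !(PySem.Dict.getD d k []).isEmpty) = true then ps ++ [pvFmt d k] else ps) parts1
  PySem.Str.join "; " parts

-- ===== PORT B =====
-- rank(k) = order.index(k) if k in order else len(order)
def pvRank (k : String) : Int :=
  if pvOrder.contains k then (((PySem.List.index? pvOrder k).getD 0 : Nat) : Int)
  else (pvOrder.length : Int)

def format_concept_hits_alt (hits : List (String × List String)) : String :=
  let d := PySem.Dict.ofList hits
  -- for key in sorted(hits, key=lambda k: (rank(k), k)): if hits[key]: parts.append(...)
  let parts := (PySem.List.sorted2 d.keys (fun k => pvRank k) (fun k => k) false).foldl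
      (fun ps k => if (!(PySem.Dict.getD d k []).isEmpty) = true then ps ++ [pvFmt d k] else ps) []
  PySem.Str.join "; " parts

-- ===== PRECONDITION & SPEC =====
def Spec_format_concept_hits (hits : List (String × List String)) (out : String) : Prop := out = format_concept_hits_alt hits
instance (hits : List (String × List String)) (out : String) : Decidable (Spec_format_concept_hits hits out) := by unfold Spec_format_concept_hits; infer_instance

-- ===== CLAIM (what is proved, stated in full; the proofs are below) =====
def Claim_equal_format_concept_hits : Prop := ∀ (hits : List (String × List String)), Dom_format_concept_hits hits → Spec_format_concept_hits hits (format_concept_hits hits)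

-- ===== LEMMAS AND PROOFS =====

-- B's tuple-key sort is the sort under the lexicographic key toLex (rank k, k)
lemma pv_sorted2_eq_sorted_lex (xs : List String) :
    PySem.List.sorted2 xs (fun k => pvRank k) (fun k => k) false
      = PySem.List.sorted xs (fun k => toLex (pvRank k, k)) false := by
  rw [PySem.List.sorted_eq_foldl_insertBy]
  unfold PySem.List.sorted2
  show (List.foldl (fun acc x => PySem.List.insertBy
      (fun a b => decide (pvRank a < pvRank b) || (!decide (pvRank b < pvRank a) && decide (a < b)))
      x acc) [] xs) = _
  congr 1
  funext acc x
  congr 1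
  funext a b
  by_cases h1 : pvRank a < pvRank b
  · simp [h1, Prod.Lex.toLex_lt_toLex]
  · by_cases h2 : pvRank b < pvRank a
    · have hne : ¬ pvRank a = pvRank b := by omega
      simp [h1, h2, hne, Prod.Lex.toLex_lt_toLex]
    · have heq : pvRank a = pvRank b := by omega
      simp [heq, Prod.Lex.toLex_lt_toLex]

-- the known keys present in d, in the fixed order
def pvKnowns (d : PySem.Dict String (List String)) : List String :=
  pvOrder.filter (fun k => d.contains k)

-- the extra keys, alphabetically
def pvExtras (d : PySem.Dict String (List String)) : List String :=
  (PySem.List.sorted d.keys (fun k => k) false).filter (fun k => !pvOrder.contains k)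

lemma pv_rank_lt_of_mem {a : String} (h : a ∈ pvOrder) : pvRank a < 5 := by
  fin_cases h <;> decide

lemma pv_rank_of_not_mem {a : String} (h : a ∉ pvOrder) : pvRank a = 5 := by
  have hc : pvOrder.contains a = false := by simpa using h
  simp only [pvRank, hc, Bool.false_eq_true, if_false]
  decide

-- the lex-sorted key list is exactly knowns ++ extras
lemma pv_sorted_lex_eq (d : PySem.Dict String (List String)) (hnd : d.keys.Nodup) :
    PySem.List.sorted d.keys (fun k => toLex (pvRank k, k)) false = pvKnowns d ++ pvExtras d := by
  apply PySem.List.sorted_eq_of_perm_of_pairwise_lt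
  · -- permutation
    have hndK : (pvKnowns d).Nodup := by
      have : pvOrder.Nodup := by decide
      exact this.filter _
    have hndS : (PySem.List.sorted d.keys (fun k => k) false).Nodup :=
      (PySem.List.sorted_perm d.keys (fun k => k) false).nodup_iff.mpr hnd
    have hndE : (pvExtras d).Nodup := hndS.filter _
    have hndA : (pvKnowns d ++ pvExtras d).Nodup := by
      refine hndK.append hndE ?_
      intro a haK haE
      have h1 : a ∈ pvOrder := (List.mem_filter.mp haK).1
      have h2 : (!pvOrder.contains a) = true := (List.mem_filter.mp haE).2
      simp at h2
      exact h2 h1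
    rw [List.perm_ext_iff_of_nodup hndA hnd]
    intro a
    constructor
    · intro ha
      rcases List.mem_append.mp ha with h | h
      · have := (List.mem_filter.mp h).2
        exact (PySem.Dict.contains_iff_mem_keys d a).mp (by simpa using this)
      · have := (List.mem_filter.mp h).1
        exact (PySem.List.mem_sorted _ _ _ _).mp this
    · intro ha
      by_cases hmem : a ∈ pvOrder
      · refine List.mem_append.mpr (Or.inl ?_)
        refine List.mem_filter.mpr ⟨by simpa using hmem, ?_⟩
        simpa using (PySem.Dict.contains_iff_mem_keys d a).mpr ha
      · refine List.mem_append.mpr (Or.inr ?_)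
        refine List.mem_filter.mpr ⟨(PySem.List.mem_sorted _ _ _ _).mpr ha, ?_⟩
        simpa using hmem
  · -- strictly increasing lex keys
    rw [List.pairwise_append]
    refine ⟨?_, ?_, ?_⟩
    · have hpw : pvOrder.Pairwise (fun a b => pvRank a < pvRank b) := by decide
      have hf : List.Pairwise (fun a b => pvRank a < pvRank b) (pvKnowns d) :=
        List.Pairwise.sublist List.filter_sublist hpw
      exact hf.imp (fun h => Prod.Lex.toLex_lt_toLex.mpr (Or.inl h))
    · have hle : (PySem.List.sorted d.keys (fun k => k) false).Pairwise (fun a b => a ≤ b) :=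
        PySem.List.sorted_pairwise d.keys (fun k => k)
      have hne : (PySem.List.sorted d.keys (fun k => k) false).Pairwise (fun a b => a ≠ b) :=
        (PySem.List.sorted_perm d.keys (fun k => k) false).nodup_iff.mpr hnd
      have hboth := hle.and hne
      have hsub : List.Pairwise (fun a b => a ≤ b ∧ a ≠ b) (pvExtras d) :=
        List.Pairwise.sublist List.filter_sublist hboth
      refine hsub.imp_of_mem ?_
      intro a b ha hb hab
      have hna : a ∉ pvOrder := by
        have := (List.mem_filter.mp ha).2; simpa using this
      have hnb : b ∉ pvOrder := by
        have := (List.mem_filter.mp hb).2; simpa using this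
      refine Prod.Lex.toLex_lt_toLex.mpr (Or.inr ⟨?_, lt_of_le_of_ne hab.1 hab.2⟩)
      rw [pv_rank_of_not_mem hna, pv_rank_of_not_mem hnb]
    · intro a haK b hbE
      have hma : a ∈ pvOrder := (List.mem_filter.mp haK).1
      have hnb : b ∉ pvOrder := by
        have := (List.mem_filter.mp hbE).2; simpa using this
      refine Prod.Lex.toLex_lt_toLex.mpr (Or.inl ?_)
      rw [pv_rank_of_not_mem hnb]
      exact pv_rank_lt_of_mem hma

-- ===== VERDICT (by name: the statement is the Claim_ definition above) =====
theorem format_concept_hits_spec : Claim_equal_format_concept_hits := by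
  intro hits _
  unfold Spec_format_concept_hits format_concept_hits format_concept_hits_alt
  simp only []
  set d := PySem.Dict.ofList hits with hd
  rw [pv_sorted2_eq_sorted_lex, pv_sorted_lex_eq d (PySem.Dict.nodup_keys_ofList hits)]
  rw [PySem.List.foldl_append_if, PySem.List.foldl_append_if, PySem.List.foldl_append_if]
  simp only [List.nil_append, List.filter_append, List.map_append]
  refine congrArg _ ?_
  unfold pvKnowns pvExtras
  rw [List.filter_filter, List.filter_filter]
  congr 1
  · exact congrArg _ (List.filter_congr (fun k _ => Bool.and_comm _ _))
  · exact congrArg _ (List.filter_congr (fun k _ => Bool.and_comm _ _))
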